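-- pv_equiv track=rewrite | github.com/d33panpaudel07/allSemesterCodes | 4th_Semester/Artificial Intelligence/labWorks/lab 4/pythonProject/sourceCodes/ruleBasedSystems/q5_smart_home_automation.py | smart_home_action
-- ===== SOURCE A (Python) =====
-- def smart_home_action(temperature, is_dark, at_home, security_armed, door_open):
--     actions = []
--     rules = {
--         (lambda temp: temp < 18, None, None, None, None): "Turn on the heater.",
--         (lambda temp: temp > 25, None, None, None, None): "Turn on the air conditioner.",
--         (None, lambda dark, home: dark == "yes" and home == "yes", None, None, None): "Turn on the lights.",
--         (None, None, None, lambda armed, door: armed == "yes" and door == "yes", None): "Sound the alarm."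
--     }
--
--     for (temp_cond, light_cond, home_cond, sec_cond, door_cond), action in rules.items():
--         if (temp_cond is None or temp_cond(temperature)) and \
--                 (light_cond is None or light_cond(is_dark, at_home)) and \
--                 (home_cond is None or home_cond(at_home)) and \
--                 (sec_cond is None or sec_cond(security_armed, door_open)) and \
--                 (door_cond is None or door_cond(door_open)):
--             actions.append(action)
--
--     if not actions:
--         actions.append("No specific action required.")
--
--     return actions
-- ===== SOURCE B (Python) =====
-- def smart_home_action(temperature, is_dark, at_home, security_armed, door_open):
--     actions = []
--     if temperature < 18:
--         actions.append("Turn on the heater.")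
--     if temperature > 25:
--         actions.append("Turn on the air conditioner.")
--     if is_dark == "yes" and at_home == "yes":
--         actions.append("Turn on the lights.")
--     if security_armed == "yes" and door_open == "yes":
--         actions.append("Sound the alarm.")
--     if not actions:
--         actions.append("No specific action required.")
--     return actions
-- ===== Notes on version B (the rewrite author's own statement) =====
-- stated objective: simpler
-- what changed: Replaced the dict of lambda-tuple rules and the generic rule-evaluation loop with four plain sequential if statements in the same order.
import Mathlib
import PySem

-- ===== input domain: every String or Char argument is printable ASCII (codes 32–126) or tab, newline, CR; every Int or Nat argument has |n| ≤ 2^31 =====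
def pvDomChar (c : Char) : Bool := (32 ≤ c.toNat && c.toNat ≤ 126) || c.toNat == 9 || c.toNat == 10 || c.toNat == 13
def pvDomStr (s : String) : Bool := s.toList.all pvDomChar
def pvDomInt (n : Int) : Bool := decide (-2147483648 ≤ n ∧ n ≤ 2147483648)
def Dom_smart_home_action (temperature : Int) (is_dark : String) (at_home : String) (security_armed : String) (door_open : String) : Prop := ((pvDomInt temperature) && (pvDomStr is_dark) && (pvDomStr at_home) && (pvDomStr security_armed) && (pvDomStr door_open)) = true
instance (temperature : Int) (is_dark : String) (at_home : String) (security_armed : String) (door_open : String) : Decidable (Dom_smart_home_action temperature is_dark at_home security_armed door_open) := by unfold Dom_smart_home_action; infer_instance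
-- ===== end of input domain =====

-- ===== PORT A =====
-- Literal transliteration of A: the rules dict (insertion order) of optional
-- condition lambdas, evaluated by a fold in order; each None slot passes.
def smart_home_action (temperature : Int) (is_dark : String) (at_home : String) (security_armed : String) (door_open : String) : List String :=
  let rules : List ((Option (Int → Bool) × Option (String → String → Bool) × Option (String → Bool) × Option (String → String → Bool) × Option (String → Bool)) × String) :=
    [((some (fun temp => temp < 18), none, none, none, none), "Turn on the heater."),
     ((some (fun temp => temp > 25), none, none, none, none), "Turn on the air conditioner."),
     ((none, some (fun dark home => dark == "yes" && home == "yes"), none, none, none), "Turn on the lights."),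
     ((none, none, none, some (fun armed door => armed == "yes" && door == "yes"), none), "Sound the alarm.")]
  let actions : List String :=
    rules.foldl (fun actions r =>
      let (conds, action) := r
      let (temp_cond, light_cond, home_cond, sec_cond, door_cond) := conds
      if (temp_cond.elim true (fun f => f temperature)) &&
         (light_cond.elim true (fun f => f is_dark at_home)) &&
         (home_cond.elim true (fun f => f at_home)) &&
         (sec_cond.elim true (fun f => f security_armed door_open)) &&
         (door_cond.elim true (fun f => f door_open)) then
        actions ++ [action]
      else actions) []
  if actions = [] then actions ++ ["No specific action required."] else actions

-- ===== PORT B =====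
-- B: four sequential if-appends, then the empty-case default.
def smart_home_action_alt (temperature : Int) (is_dark : String) (at_home : String) (security_armed : String) (door_open : String) : List String :=
  let a0 : List String := []
  let a1 := if temperature < 18 then a0 ++ ["Turn on the heater."] else a0
  let a2 := if temperature > 25 then a1 ++ ["Turn on the air conditioner."] else a1
  let a3 := if is_dark == "yes" && at_home == "yes" then a2 ++ ["Turn on the lights."] else a2
  let a4 := if security_armed == "yes" && door_open == "yes" then a3 ++ ["Sound the alarm."] else a3
  if a4 = [] then a4 ++ ["No specific action required."] else a4

-- ===== PRECONDITION & SPEC =====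
def Spec_smart_home_action (temperature : Int) (is_dark : String) (at_home : String) (security_armed : String) (door_open : String) (out : List String) : Prop := out = smart_home_action_alt temperature is_dark at_home security_armed door_open
instance (temperature : Int) (is_dark : String) (at_home : String) (security_armed : String) (door_open : String) (out : List String) : Decidable (Spec_smart_home_action temperature is_dark at_home security_armed door_open out) := by unfold Spec_smart_home_action; infer_instance

-- ===== CLAIM (what is proved, stated in full; the proofs are below) =====
def Claim_equal_smart_home_action : Prop := ∀ (temperature : Int) (is_dark : String) (at_home : String) (security_armed : String) (door_open : String), Dom_smart_home_action temperature is_dark at_home security_armed door_open → Spec_smart_home_action temperature is_dark at_home security_armed door_open (smart_home_action temperature is_dark at_home security_armed door_open)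

-- ===== LEMMAS AND PROOFS =====

-- ===== VERDICT (by name: the statement is the Claim_ definition above) =====
theorem smart_home_action_spec : Claim_equal_smart_home_action := by
  intro temperature is_dark at_home security_armed door_open _
  unfold Spec_smart_home_action smart_home_action smart_home_action_alt
  simp only [List.foldl, Option.elim, Bool.and_true, Bool.true_and]
  split_ifs <;> simp_all
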